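-- pv_equiv track=rewrite | github.com/guillaumehuet/AdventOfCode | 2018/04_2/solve.py | processGuardShift
-- ===== SOURCE A (Python) =====
-- def processGuardShift(shift):
--   total = 0
--   minState = [0 for _ in range(60)]
--   for sleep in shift:
--     total += sleep[1] - sleep[0]
--     for m in range(sleep[0], sleep[1]):
--       minState[m] += 1
--   bestMin = 0
--   bestMinState = 0
--   for m in range(len(minState)):
--     if minState[m] > bestMinState:
--       bestMin = m
--       bestMinState = minState[m]
--   return total, bestMin, bestMinState
-- ===== SOURCE B (Python) =====
-- def processGuardShift(shift):
--   total = 0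
--   diff = [0] * 61
--   for a, b in shift:
--     total += b - a
--     if a < b:
--       diff[a] += 1
--       diff[b] -= 1
--   bestMin = 0
--   bestMinState = 0
--   running = 0
--   for m in range(60):
--     running += diff[m]
--     if running > bestMinState:
--       bestMin = m
--       bestMinState = running
--   return total, bestMin, bestMinState
-- ===== Notes on version B (the rewrite author's own statement) =====
-- stated objective: faster
-- what changed: Replaces A's per-minute filling of each sleep interval (one array write per slept minute) by a difference array with two updates per interval plus a single running prefix-sum scan over the 60 minutes that also does the strict-> argmax.
-- outside the precondition, e.g. on processGuardShift([(-1, 1)]): A returns (2, 0, 1), B returns (2, 0, 0)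
import Mathlib
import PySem

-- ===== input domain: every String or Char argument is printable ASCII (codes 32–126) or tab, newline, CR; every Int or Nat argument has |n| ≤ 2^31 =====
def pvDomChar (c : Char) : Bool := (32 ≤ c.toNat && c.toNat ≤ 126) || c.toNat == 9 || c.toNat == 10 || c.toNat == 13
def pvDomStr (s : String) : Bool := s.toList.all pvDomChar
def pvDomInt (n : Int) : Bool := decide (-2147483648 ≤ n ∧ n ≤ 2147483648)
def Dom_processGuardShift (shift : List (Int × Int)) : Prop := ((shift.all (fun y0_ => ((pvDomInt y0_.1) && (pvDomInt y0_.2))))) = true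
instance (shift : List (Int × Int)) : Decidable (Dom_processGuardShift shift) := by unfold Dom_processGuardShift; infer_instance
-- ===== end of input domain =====

-- B replaces A's per-minute filling of each sleep interval by a difference array (two writes per
-- interval) and one running prefix-sum scan that also performs the strict-> argmax (measured faster
-- by a constant factor). Return values only; neither program mutates its argument.

-- ===== PORT A =====
-- Python list update xs[i] += v: a negative index wraps by len(xs); an out-of-range index is an
-- IndexError in Python, excluded by Pre_ (the 'else xs' branch is never reached under Pre_).
def pyAddAt (xs : List Int) (i v : Int) : List Int :=
  let j := if i < 0 then i + (xs.length : Int) else i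
  if 0 ≤ j ∧ j < (xs.length : Int) then xs.set j.toNat (xs.getD j.toNat 0 + v) else xs

def processGuardShift (shift : List (Int × Int)) : Int × Int × Int :=
  -- total = 0; minState = [0 for _ in range(60)]; fill each sleep's minutes one by one
  let st := shift.foldl
    (fun (st : Int × List Int) sleep =>
      (PySem.List.pyRange sleep.1 sleep.2 1).foldl
        (fun (s : Int × List Int) m => (s.1, pyAddAt s.2 m 1))
        (st.1 + (sleep.2 - sleep.1), st.2))
    (0, List.replicate 60 0)
  -- strict '>' scan over range(len(minState)); every read minState[m] is in range here
  let best := (PySem.List.pyRange 0 (st.2.length : Int) 1).foldl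
    (fun (b : Int × Int) m =>
      if PySem.List.pyGetD st.2 m 0 > b.2 then (m, PySem.List.pyGetD st.2 m 0) else b)
    (0, 0)
  (st.1, best.1, best.2)

-- ===== PORT B =====
def processGuardShift_alt (shift : List (Int × Int)) : Int × Int × Int :=
  -- total = 0; diff = [0] * 61; two difference-array writes per non-empty interval
  let st := shift.foldl
    (fun (st : Int × List Int) p =>
      let total := st.1 + (p.2 - p.1)
      if p.1 < p.2 then (total, pyAddAt (pyAddAt st.2 p.1 1) p.2 (-1)) else (total, st.2))
    (0, List.replicate 61 0)
  -- running prefix sum over range(60) with the strict '>' argmax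
  let fin := (PySem.List.pyRange 0 60 1).foldl
    (fun (s : (Int × Int) × Int) m =>
      let running := s.2 + PySem.List.pyGetD st.2 m 0
      ((if running > s.1.2 then (m, running) else s.1), running))
    ((0, 0), 0)
  (st.1, fin.1.1, fin.1.2)

-- ===== PRECONDITION & SPEC =====
-- Pre_ restricts every non-empty sleep interval to the minute-of-hour domain 0..60: an end past
-- minute 60 (or a start below -60) makes A raise IndexError, and a negative start is outside the
-- function's minute domain, where both programs' values stem from accidental Python negative-index
-- wraparound into different-sized lists and no caller would specify either.
def Pre_processGuardShift (shift : List (Int × Int)) : Prop :=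
  ∀ p ∈ shift, p.1 < p.2 → 0 ≤ p.1 ∧ p.2 ≤ 60
instance (shift : List (Int × Int)) : Decidable (Pre_processGuardShift shift) := by
  unfold Pre_processGuardShift; infer_instance

def pvWitness_processGuardShift : (List (Int × Int)) := [(5, 30), (10, 35), (50, 20)]

def Spec_processGuardShift (shift : List (Int × Int)) (out : Int × Int × Int) : Prop := out = processGuardShift_alt shift
instance (shift : List (Int × Int)) (out : Int × Int × Int) : Decidable (Spec_processGuardShift shift out) := by unfold Spec_processGuardShift; infer_instance

-- ===== CLAIM (what is proved, stated in full; the proofs are below) =====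
def Claim_equal_processGuardShift : Prop := ∀ (shift : List (Int × Int)), Dom_processGuardShift shift → Pre_processGuardShift shift → Spec_processGuardShift shift (processGuardShift shift)

-- ===== LEMMAS AND PROOFS =====

-- number of intervals of `shift` covering minute m
def pvCnt (shift : List (Int × Int)) (m : Int) : Int :=
  (shift.countP (fun p => decide (p.1 ≤ m ∧ m < p.2)) : Int)

theorem pvCnt_cons (p : Int × Int) (t : List (Int × Int)) (m : Int) :
    pvCnt (p :: t) m = pvCnt t m + (if p.1 ≤ m ∧ m < p.2 then 1 else 0) := by
  unfold pvCnt
  rw [List.countP_cons]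
  by_cases h : p.1 ≤ m ∧ m < p.2 <;> simp [h]

theorem pyAddAt_length (xs : List Int) (i v : Int) : (pyAddAt xs i v).length = xs.length := by
  unfold pyAddAt
  dsimp only
  split_ifs <;> simp

theorem pyAddAt_in (xs : List Int) (i v : Int) (h0 : 0 ≤ i) (h1 : i < (xs.length : Int)) :
    pyAddAt xs i v = xs.set i.toNat (xs.getD i.toNat 0 + v) := by
  unfold pyAddAt
  have h2 : ¬ i < 0 := by omega
  simp only [h2, if_false]
  rw [if_pos ⟨h0, h1⟩]

theorem pyAddAt_getD (xs : List Int) (i v : Int) (h0 : 0 ≤ i) (h1 : i < (xs.length : Int))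
    (k : Nat) (hk : k < xs.length) :
    (pyAddAt xs i v).getD k 0 = xs.getD k 0 + (if i = (k : Int) then v else 0) := by
  rw [pyAddAt_in xs i v h0 h1]
  rw [List.getD_eq_getElem?_getD, List.getD_eq_getElem?_getD]
  by_cases hik : i = (k : Int)
  · have hit : i.toNat = k := by omega
    rw [hit, if_pos hik, List.getElem?_set_self (by omega), List.getElem?_eq_getElem hk]
    simp [List.getD_eq_getElem?_getD, hk]
  · have hne : i.toNat ≠ k := by omega
    rw [if_neg hik, List.getElem?_set_ne hne, List.getD_eq_getElem?_getD]
    ring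

-- sum of the first k entries
def pvPsum (xs : List Int) (k : Nat) : Int := ((xs.take k).sum)

theorem pvPsum_succ (xs : List Int) (k : Nat) (hk : k < xs.length) :
    pvPsum xs (k + 1) = pvPsum xs k + xs.getD k 0 := by
  unfold pvPsum
  rw [List.sum_take_succ xs k hk, List.getD_eq_getElem?_getD, List.getElem?_eq_getElem hk]
  rfl

theorem pvPsum_pyAddAt (xs : List Int) (i v : Int) (h0 : 0 ≤ i) (h1 : i < (xs.length : Int))
    (k : Nat) (hk : k ≤ xs.length) :
    pvPsum (pyAddAt xs i v) k = pvPsum xs k + (if i < (k : Int) then v else 0) := by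
  induction k with
  | zero =>
    rw [if_neg (show ¬ i < ((0 : Nat) : Int) by omega)]
    simp [pvPsum]
  | succ n ih =>
    have hn : n < xs.length := by omega
    have hn' : n < (pyAddAt xs i v).length := by rw [pyAddAt_length]; omega
    rw [pvPsum_succ _ n hn', pvPsum_succ xs n hn, ih (by omega),
        pyAddAt_getD xs i v h0 h1 n hn]
    have : (((n + 1 : Nat)) : Int) = (n : Int) + 1 := by push_cast; ring
    rw [this]
    split_ifs <;> omega

-- ===== A-side characterisation =====

-- the inner fill loop never touches the first (total) component
theorem foldl_snd_only (l : List Int) :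
    ∀ (t : Int) (L : List Int),
    l.foldl (fun (s : Int × List Int) m => (s.1, pyAddAt s.2 m 1)) (t, L)
      = (t, l.foldl (fun M m => pyAddAt M m 1) L) := by
  induction l with
  | nil => intro t L; rfl
  | cons x xs ih => intro t L; simp only [List.foldl_cons]; exact ih t (pyAddAt L x 1)

-- filling range(a, b) adds 1 exactly on the minutes a ≤ k < b
theorem fill_list_spec (b : Int) : ∀ (n : Nat) (a : Int), (b - a).toNat = n →
    ∀ L : List Int, (a < b → 0 ≤ a) → (a < b → b ≤ (L.length : Int)) →
    ((PySem.List.pyRange a b 1).foldl (fun M m => pyAddAt M m 1) L).length = L.length ∧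
    ∀ k : Nat, k < L.length →
      ((PySem.List.pyRange a b 1).foldl (fun M m => pyAddAt M m 1) L).getD k 0
        = L.getD k 0 + (if a ≤ (k : Int) ∧ (k : Int) < b then 1 else 0) := by
  intro n
  induction n with
  | zero =>
    intro a hn L _ _
    have hba : b ≤ a := by omega
    rw [PySem.List.pyRange_one_eq_nil hba]
    refine ⟨rfl, fun k hk => ?_⟩
    have : ¬ (a ≤ (k : Int) ∧ (k : Int) < b) := by omega
    simp [this]
  | succ n ih =>
    intro a hn L ha hb
    have hab : a < b := by omega
    have h0 : 0 ≤ a := ha hab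
    have h1 : a < (L.length : Int) := by have := hb hab; omega
    rw [PySem.List.pyRange_one_cons hab]
    simp only [List.foldl_cons]
    have hlen : (pyAddAt L a 1).length = L.length := pyAddAt_length L a 1
    obtain ⟨ihlen, ihget⟩ := ih (a + 1) (by omega) (pyAddAt L a 1)
      (fun _ => by omega) (fun _ => by rw [hlen]; exact hb hab)
    refine ⟨by rw [ihlen, hlen], fun k hk => ?_⟩
    rw [ihget k (by omega), pyAddAt_getD L a 1 h0 h1 k hk]
    split_ifs <;> omega

-- outer loop of A: total is the sum of interval lengths, minState counts covering intervals
theorem foldA_spec (shift : List (Int × Int)) :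
    ∀ (t : Int) (L : List Int), L.length = 60 →
    (∀ p ∈ shift, p.1 < p.2 → 0 ≤ p.1 ∧ p.2 ≤ 60) →
    (shift.foldl
      (fun (st : Int × List Int) sleep =>
        (PySem.List.pyRange sleep.1 sleep.2 1).foldl
          (fun (s : Int × List Int) m => (s.1, pyAddAt s.2 m 1))
          (st.1 + (sleep.2 - sleep.1), st.2)) (t, L)).1
      = t + (shift.map (fun p => p.2 - p.1)).sum ∧
    (shift.foldl
      (fun (st : Int × List Int) sleep =>
        (PySem.List.pyRange sleep.1 sleep.2 1).foldl
          (fun (s : Int × List Int) m => (s.1, pyAddAt s.2 m 1))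
          (st.1 + (sleep.2 - sleep.1), st.2)) (t, L)).2.length = 60 ∧
    ∀ k : Nat, k < 60 →
      (shift.foldl
        (fun (st : Int × List Int) sleep =>
          (PySem.List.pyRange sleep.1 sleep.2 1).foldl
            (fun (s : Int × List Int) m => (s.1, pyAddAt s.2 m 1))
            (st.1 + (sleep.2 - sleep.1), st.2)) (t, L)).2.getD k 0
        = L.getD k 0 + pvCnt shift k := by
  induction shift with
  | nil =>
    intro t L hL _
    refine ⟨by simp, hL, fun k hk => by simp [pvCnt]⟩
  | cons p rest ih =>
    intro t L hL hpre
    simp only [List.foldl_cons]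
    rw [foldl_snd_only (PySem.List.pyRange p.1 p.2 1) (t + (p.2 - p.1)) L]
    have hb' : p.1 < p.2 → p.2 ≤ (L.length : Int) := by
      intro h; rw [hL]; exact_mod_cast (hpre p (by simp) h).2
    obtain ⟨flen, fget⟩ := fill_list_spec p.2 (p.2 - p.1).toNat p.1 rfl L
      (fun h => (hpre p (by simp) h).1) hb'
    obtain ⟨ih1, ih2, ih3⟩ := ih (t + (p.2 - p.1))
      ((PySem.List.pyRange p.1 p.2 1).foldl (fun M m => pyAddAt M m 1) L)
      (by rw [flen, hL]) (fun q hq => hpre q (by simp [hq]))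
    refine ⟨by rw [ih1]; simp; ring, ih2, fun k hk => ?_⟩
    rw [ih3 k hk, fget k (by omega), pvCnt_cons]
    ring

-- ===== B-side characterisation =====

-- outer loop of B: total is the sum of interval lengths, the prefix sums of the difference
-- array are the covering counts
theorem foldB_spec (shift : List (Int × Int)) :
    ∀ (t : Int) (D : List Int), D.length = 61 →
    (∀ p ∈ shift, p.1 < p.2 → 0 ≤ p.1 ∧ p.2 ≤ 60) →
    (shift.foldl
      (fun (st : Int × List Int) p =>
        if p.1 < p.2 then (st.1 + (p.2 - p.1), pyAddAt (pyAddAt st.2 p.1 1) p.2 (-1))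
        else (st.1 + (p.2 - p.1), st.2))
      (t, D)).1 = t + (shift.map (fun p => p.2 - p.1)).sum ∧
    (shift.foldl
      (fun (st : Int × List Int) p =>
        if p.1 < p.2 then (st.1 + (p.2 - p.1), pyAddAt (pyAddAt st.2 p.1 1) p.2 (-1))
        else (st.1 + (p.2 - p.1), st.2))
      (t, D)).2.length = 61 ∧
    ∀ k : Nat, k < 60 →
      pvPsum (shift.foldl
        (fun (st : Int × List Int) p =>
          if p.1 < p.2 then (st.1 + (p.2 - p.1), pyAddAt (pyAddAt st.2 p.1 1) p.2 (-1))
          else (st.1 + (p.2 - p.1), st.2))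
        (t, D)).2 (k + 1)
        = pvPsum D (k + 1) + pvCnt shift k := by
  induction shift with
  | nil =>
    intro t D hD _
    refine ⟨by simp, hD, fun k hk => by simp [pvCnt]⟩
  | cons p rest ih =>
    intro t D hD hpre
    simp only [List.foldl_cons]
    by_cases hp : p.1 < p.2
    · have hb1 : 0 ≤ p.1 ∧ p.2 ≤ 60 := hpre p (by simp) hp
      have hlen1 : (pyAddAt D p.1 1).length = D.length := pyAddAt_length D p.1 1
      have hlen2 : (pyAddAt (pyAddAt D p.1 1) p.2 (-1)).length = D.length := by
        rw [pyAddAt_length, hlen1]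
      obtain ⟨ih1, ih2, ih3⟩ := ih (t + (p.2 - p.1)) (pyAddAt (pyAddAt D p.1 1) p.2 (-1))
        (by rw [hlen2, hD]) (fun q hq => hpre q (by simp [hq]))
      rw [if_pos hp]
      refine ⟨by rw [ih1]; simp; ring, ih2, fun k hk => ?_⟩
      rw [ih3 k hk,
          pvPsum_pyAddAt (pyAddAt D p.1 1) p.2 (-1) (by omega)
            (by rw [hlen1, hD]; omega) (k + 1) (by rw [hlen1, hD]; omega),
          pvPsum_pyAddAt D p.1 1 hb1.1 (by rw [hD]; omega) (k + 1) (by rw [hD]; omega),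
          pvCnt_cons]
      have hc : (((k + 1 : Nat)) : Int) = (k : Int) + 1 := by push_cast; ring
      rw [hc]
      split_ifs <;> omega
    · rw [if_neg hp]
      obtain ⟨ih1, ih2, ih3⟩ := ih (t + (p.2 - p.1)) D hD (fun q hq => hpre q (by simp [hq]))
      refine ⟨by rw [ih1]; simp; ring, ih2, fun k hk => ?_⟩
      rw [ih3 k hk, pvCnt_cons]
      have : ¬ (p.1 ≤ (k : Int) ∧ (k : Int) < p.2) := by omega
      simp [this]

-- B's running-sum scan computes the same argmax as a direct scan of the counts
theorem scanB_spec (D : List Int) (hD : D.length = 61) (c : Int → Int)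
    (hc : ∀ k : Nat, k < 60 → pvPsum D (k + 1) = c k) :
    ∀ (n : Nat) (s : Nat), 60 - s = n → s ≤ 60 → ∀ bb : Int × Int,
    (PySem.List.pyRange (s : Int) 60 1).foldl
      (fun (st : (Int × Int) × Int) m =>
        ((if st.2 + PySem.List.pyGetD D m 0 > st.1.2 then (m, st.2 + PySem.List.pyGetD D m 0)
          else st.1), st.2 + PySem.List.pyGetD D m 0))
      (bb, pvPsum D s)
      = ((PySem.List.pyRange (s : Int) 60 1).foldl
          (fun (b : Int × Int) m => if c m > b.2 then (m, c m) else b) bb,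
         pvPsum D 60) := by
  intro n
  induction n with
  | zero =>
    intro s hs hs' bb
    have h60 : s = 60 := by omega
    subst h60
    rw [PySem.List.pyRange_one_eq_nil (by norm_num)]
    rfl
  | succ n ih =>
    intro s hs hs' bb
    have hlt : (s : Int) < 60 := by omega
    rw [PySem.List.pyRange_one_cons hlt]
    simp only [List.foldl_cons]
    have hget : PySem.List.pyGetD D (s : Int) 0 = D.getD s 0 := by
      simp [PySem.List.pyGetD_natCast]
    have hrun : pvPsum D s + PySem.List.pyGetD D (s : Int) 0 = pvPsum D (s + 1) := by
      rw [hget, ← pvPsum_succ D s (by omega)]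
    have hcs : pvPsum D (s + 1) = c (s : Int) := hc s (by omega)
    have hcast : (s : Int) + 1 = ((s + 1 : Nat) : Int) := by push_cast; ring
    rw [hrun, hcast,
        ih (s + 1) (by omega) (by omega)
          (if pvPsum D (s + 1) > bb.2 then ((s : Int), pvPsum D (s + 1)) else bb),
        hcs]

-- A's scan over minState equals the direct scan of the counts
theorem scanA_eq (M : List Int) (hM : M.length = 60) (c : Int → Int)
    (hMk : ∀ k : Nat, k < 60 → M.getD k 0 = c k) :
    (PySem.List.pyRange 0 (M.length : Int) 1).foldl
      (fun (b : Int × Int) m =>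
        if PySem.List.pyGetD M m 0 > b.2 then (m, PySem.List.pyGetD M m 0) else b) (0, 0)
      = (PySem.List.pyRange 0 60 1).foldl
          (fun (b : Int × Int) m => if c m > b.2 then (m, c m) else b) (0, 0) := by
  rw [hM]
  have h60 : ((60 : Nat) : Int) = (60 : Int) := by norm_num
  rw [h60]
  apply PySem.List.foldl_congr_mem
  intro acc m hm
  have hm' : 0 ≤ m ∧ m < 60 := (PySem.List.mem_pyRange_one).1 hm
  have hget : PySem.List.pyGetD M m 0 = c m := by
    rw [PySem.List.pyGetD_eq_getElem M (0 : Int) hm'.1 (by rw [hM]; omega)]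
    have hk : m.toNat < 60 := by omega
    have := hMk m.toNat hk
    rw [List.getD_eq_getElem?_getD, List.getElem?_eq_getElem (by omega : m.toNat < M.length)] at this
    have hmm : ((m.toNat : Nat) : Int) = m := by omega
    rw [hmm] at this
    simpa using this
  rw [hget]

-- B's scan, packaged for the verdict proof
theorem scanB_final (D : List Int) (hD : D.length = 61) (c : Int → Int)
    (hc : ∀ k : Nat, k < 60 → pvPsum D (k + 1) = c k) :
    (PySem.List.pyRange 0 60 1).foldl
      (fun (st : (Int × Int) × Int) m =>
        ((if st.2 + PySem.List.pyGetD D m 0 > st.1.2 then (m, st.2 + PySem.List.pyGetD D m 0)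
          else st.1), st.2 + PySem.List.pyGetD D m 0))
      ((0, 0), 0)
      = ((PySem.List.pyRange 0 60 1).foldl
          (fun (b : Int × Int) m => if c m > b.2 then (m, c m) else b) (0, 0),
         pvPsum D 60) := by
  have h := scanB_spec D hD c hc 60 0 rfl (by omega) (0, 0)
  have h0 : pvPsum D 0 = 0 := by simp [pvPsum]
  rw [h0] at h
  simpa using h

-- ===== VERDICT (by name: the statement is the Claim_ definition above) =====
theorem processGuardShift_spec : Claim_equal_processGuardShift := by
  intro shift _ hpre
  unfold Spec_processGuardShift
  simp only [processGuardShift, processGuardShift_alt]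
  obtain ⟨hA1, hA2, hA3⟩ := foldA_spec shift 0 (List.replicate 60 0) (by simp) hpre
  obtain ⟨hB1, hB2, hB3⟩ := foldB_spec shift 0 (List.replicate 61 0) (by simp) hpre
  have hAk : ∀ k : Nat, k < 60 →
      (shift.foldl
        (fun (st : Int × List Int) sleep =>
          (PySem.List.pyRange sleep.1 sleep.2 1).foldl
            (fun (s : Int × List Int) m => (s.1, pyAddAt s.2 m 1))
            (st.1 + (sleep.2 - sleep.1), st.2)) (0, List.replicate 60 0)).2.getD k 0
        = pvCnt shift k := by
    intro k hk
    rw [hA3 k hk, List.getD_replicate (0 : Int) hk, zero_add]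
  have hBk : ∀ k : Nat, k < 60 →
      pvPsum (shift.foldl
        (fun (st : Int × List Int) p =>
          if p.1 < p.2 then (st.1 + (p.2 - p.1), pyAddAt (pyAddAt st.2 p.1 1) p.2 (-1))
          else (st.1 + (p.2 - p.1), st.2)) (0, List.replicate 61 0)).2 (k + 1)
        = pvCnt shift k := by
    intro k hk
    rw [hB3 k hk]
    unfold pvPsum
    rw [List.take_replicate, List.sum_replicate, smul_zero, zero_add]
  rw [scanA_eq _ hA2 (fun m => pvCnt shift m) hAk,
      scanB_final _ hB2 (fun m => pvCnt shift m) hBk, hA1, hB1]
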